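-- pv_equiv track=rewrite | github.com/sethbroberts/fundamentals_of_measurement | fom.py | calculate_er_intersection
-- ===== SOURCE A (Python) =====
-- def get_underlying_elements_from_relation(relation):
--     "Given a relation, find the underlying elements of the set"
--     underlying_elements_duplicates = []
--     for e1, e2 in relation:
--         underlying_elements_duplicates.append(e1)
--         underlying_elements_duplicates.append(e2)
--     underlying_elements = remove_redundant_items(underlying_elements_duplicates)
--     underlying_elements.sort()
--     return underlying_elements
--
-- def remove_redundant_items(redundant_list):
--     "Remove redundant items from a list"
--     non_redundant_list = []
--     for item in redundant_list:
--         if item not in non_redundant_list: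
--             non_redundant_list.append(item)
--     non_redundant_list.sort()
--     return non_redundant_list
--
-- def calculate_er_intersection(er1, er2):
--     "Given 2 equivalence relations, calculate the equivalence relation that is their intersection"
--     S = get_underlying_elements_from_relation(er1)
--     er3_redundant = []
--     for s1 in S:
--         for s2 in S:
--             if (s1, s2) in er1 and (s1, s2) in er2:
--                 er3_redundant.append((s1, s2))
--     er3 = remove_redundant_items(er3_redundant)
--     er3.sort()
--     return er3
-- ===== SOURCE B (Python) =====
-- def remove_redundant_items(redundant_list):
--     "Remove redundant items from a list"
--     non_redundant_list = []
--     for item in redundant_list: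
--         if item not in non_redundant_list:
--             non_redundant_list.append(item)
--     non_redundant_list.sort()
--     return non_redundant_list
--
-- def calculate_er_intersection(er1, er2):
--     "Intersection of two equivalence relations: one pass over er1's pairs"
--     er3 = remove_redundant_items([p for p in er1 if p in er2])
--     er3.sort()
--     return er3
-- ===== Notes on version B (the rewrite author's own statement) =====
-- stated objective: faster
-- what changed: B drops A's derivation of the underlying element set S and its nested S×S scan, and instead makes a single pass over er1's pairs keeping those also in er2, then reuses the same dedup+sort tail so duplicates and ordering match exactly.
import Mathlib
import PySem

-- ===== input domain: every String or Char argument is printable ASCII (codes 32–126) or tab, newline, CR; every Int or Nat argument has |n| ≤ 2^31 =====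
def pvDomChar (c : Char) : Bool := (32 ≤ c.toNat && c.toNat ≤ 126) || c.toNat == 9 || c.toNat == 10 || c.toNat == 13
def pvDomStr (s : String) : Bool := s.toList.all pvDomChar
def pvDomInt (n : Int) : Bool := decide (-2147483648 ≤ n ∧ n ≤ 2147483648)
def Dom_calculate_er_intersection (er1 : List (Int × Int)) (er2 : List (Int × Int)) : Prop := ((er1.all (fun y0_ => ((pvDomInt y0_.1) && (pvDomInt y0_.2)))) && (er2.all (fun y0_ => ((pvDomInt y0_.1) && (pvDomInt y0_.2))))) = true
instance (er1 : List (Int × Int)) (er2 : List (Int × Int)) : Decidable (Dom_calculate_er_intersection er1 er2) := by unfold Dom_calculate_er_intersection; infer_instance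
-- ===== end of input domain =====

-- B replaces A's underlying-set derivation and nested S×S scan with a single pass over er1's
-- pairs (keeping those also in er2), followed by the same dedup+sort tail.


-- ===== PORT A =====
-- remove_redundant_items, used at type Int (inside get_underlying_elements_from_relation);
-- Python's list.sort() on ints is PySem.List.sorted with the identity key.
def pv_rri_int (redundant_list : List Int) : List Int :=
  PySem.List.sorted
    (redundant_list.foldl
      (fun non_redundant_list item =>
        if item ∈ non_redundant_list then non_redundant_list
        else non_redundant_list ++ [item]) [])
    (fun x => x)

-- remove_redundant_items, used at type Int × Int (inside calculate_er_intersection);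
-- Python's list.sort() on pairs of ints compares tuples lexicographically = PySem.List.sorted2 fst snd.
def pv_rri_pair (redundant_list : List (Int × Int)) : List (Int × Int) :=
  PySem.List.sorted2
    (redundant_list.foldl
      (fun non_redundant_list item =>
        if item ∈ non_redundant_list then non_redundant_list
        else non_redundant_list ++ [item]) [])
    Prod.fst Prod.snd

def pv_get_underlying_elements_from_relation (relation : List (Int × Int)) : List Int :=
  PySem.List.sorted
    (pv_rri_int (relation.foldl (fun acc p => (acc ++ [p.1]) ++ [p.2]) []))
    (fun x => x)

def calculate_er_intersection (er1 : List (Int × Int)) (er2 : List (Int × Int)) : List (Int × Int) :=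
  let S := pv_get_underlying_elements_from_relation er1
  let er3_redundant :=
    S.foldl (fun acc s1 =>
      S.foldl (fun acc s2 =>
        if (s1, s2) ∈ er1 ∧ (s1, s2) ∈ er2 then acc ++ [(s1, s2)] else acc) acc) []
  PySem.List.sorted2 (pv_rri_pair er3_redundant) Prod.fst Prod.snd

-- ===== PORT B =====
-- B's copy of remove_redundant_items at type Int × Int (same Python helper, B's own module).
def pv_rri_pair_alt (redundant_list : List (Int × Int)) : List (Int × Int) :=
  PySem.List.sorted2
    (redundant_list.foldl
      (fun non_redundant_list item =>
        if item ∈ non_redundant_list then non_redundant_list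
        else non_redundant_list ++ [item]) [])
    Prod.fst Prod.snd

def calculate_er_intersection_alt (er1 : List (Int × Int)) (er2 : List (Int × Int)) : List (Int × Int) :=
  PySem.List.sorted2 (pv_rri_pair_alt (er1.filter (fun p => decide (p ∈ er2)))) Prod.fst Prod.snd

-- ===== PRECONDITION & SPEC =====
def Spec_calculate_er_intersection (er1 : List (Int × Int)) (er2 : List (Int × Int)) (out : List (Int × Int)) : Prop := out = calculate_er_intersection_alt er1 er2
instance (er1 : List (Int × Int)) (er2 : List (Int × Int)) (out : List (Int × Int)) : Decidable (Spec_calculate_er_intersection er1 er2 out) := by unfold Spec_calculate_er_intersection; infer_instance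

-- ===== CLAIM (what is proved, stated in full; the proofs are below) =====
def Claim_equal_calculate_er_intersection : Prop := ∀ (er1 : List (Int × Int)) (er2 : List (Int × Int)), Dom_calculate_er_intersection er1 er2 → Spec_calculate_er_intersection er1 er2 (calculate_er_intersection er1 er2)

-- ===== LEMMAS AND PROOFS =====

-- The dedup fold of remove_redundant_items is exactly PySem.Set.ofList (Int instance).
theorem pv_foldl_dedup_eq_ofList (xs : List Int) :
    xs.foldl (fun acc item => if item ∈ acc then acc else acc ++ [item]) [] = PySem.Set.ofList xs := by
  have h : ∀ (acc : List Int),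
      xs.foldl (fun acc item => if item ∈ acc then acc else acc ++ [item]) acc =
      xs.foldl PySem.Set.add acc := by
    induction xs with
    | nil => intro acc; rfl
    | cons x xs ih =>
      intro acc
      simp only [List.foldl_cons, PySem.Set.add_eq_ite, ih]
  exact h []

-- The dedup fold of remove_redundant_items, at pairs.
theorem pv_foldl_dedup_eq_ofList_pair (xs : List (Int × Int)) :
    xs.foldl (fun acc item => if item ∈ acc then acc else acc ++ [item]) [] = PySem.Set.ofList xs := by
  have h : ∀ (acc : List (Int × Int)),
      xs.foldl (fun acc item => if item ∈ acc then acc else acc ++ [item]) acc =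
      xs.foldl PySem.Set.add acc := by
    induction xs with
    | nil => intro acc; rfl
    | cons x xs ih =>
      intro acc
      simp only [List.foldl_cons, PySem.Set.add_eq_ite, ih]
  exact h []

-- Python's tuple sort: sorted2 fst snd is sorted with the lexicographic key.
theorem pv_sorted2_eq_sorted_toLex (xs : List (Int × Int)) :
    PySem.List.sorted2 xs Prod.fst Prod.snd = PySem.List.sorted xs (fun p => toLex p) := by
  simp only [PySem.List.sorted2, PySem.List.sorted]
  congr 1
  funext acc x
  congr 1
  funext a b
  rcases a with ⟨a1, a2⟩
  rcases b with ⟨b1, b2⟩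
  simp only [Prod.Lex.lt_iff, ofLex_toLex]
  by_cases h1 : a1 < b1 <;> by_cases h2 : b1 < a1 <;> by_cases h3 : a2 < b2 <;>
    simp [h1, h2, h3] <;> omega

-- sorted2 of any rearrangement of a strictly lex-increasing list ys is ys itself.
theorem pv_sorted2_eq_of_perm (xs ys : List (Int × Int))
    (hp : ys.Perm xs)
    (hs : ys.Pairwise (fun a b => (toLex a : Lex (Int × Int)) < toLex b)) :
    PySem.List.sorted2 xs Prod.fst Prod.snd = ys := by
  rw [pv_sorted2_eq_sorted_toLex]
  exact PySem.List.sorted_eq_of_perm_of_pairwise_lt xs ys _ hp hs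

-- A's S is strictly increasing and contains exactly the components of er1's pairs.
theorem pv_S_pairwise (er1 : List (Int × Int)) :
    (pv_get_underlying_elements_from_relation er1).Pairwise (· < ·) := by
  unfold pv_get_underlying_elements_from_relation pv_rri_int
  rw [pv_foldl_dedup_eq_ofList]
  have hnd : (PySem.List.sorted (PySem.Set.ofList
      (er1.foldl (fun acc p => (acc ++ [p.1]) ++ [p.2]) [])) (fun x => x)).Nodup :=
    (PySem.List.sorted_perm _ _ _).nodup_iff.mpr (PySem.Set.nodup_ofList _)
  have hle := PySem.List.sorted_pairwise (PySem.Set.ofList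
      (er1.foldl (fun acc p => (acc ++ [p.1]) ++ [p.2]) [])) (fun x => x)
  rw [PySem.List.sorted_eq_self_of_pairwise _ _ hle]
  exact (hle.and hnd).imp (fun h => lt_of_le_of_ne h.1 h.2)

theorem pv_mem_S (er1 : List (Int × Int)) (x : Int) :
    x ∈ pv_get_underlying_elements_from_relation er1 ↔ ∃ p ∈ er1, x = p.1 ∨ x = p.2 := by
  unfold pv_get_underlying_elements_from_relation pv_rri_int
  rw [pv_foldl_dedup_eq_ofList]
  have hfold : (fun (acc : List Int) (p : Int × Int) => (acc ++ [p.1]) ++ [p.2]) =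
      fun acc p => acc ++ [p.1, p.2] := by
    funext acc p; simp
  rw [hfold, PySem.List.mem_sorted, PySem.List.mem_sorted, PySem.Set.mem_ofList,
      PySem.List.foldl_append_eq_flatMap (fun p => [p.1, p.2]) er1 []]
  simp

-- the pair list A collects from its nested loop
def pv_dA (er1 er2 : List (Int × Int)) : List (Int × Int) :=
  (pv_get_underlying_elements_from_relation er1).flatMap (fun s1 =>
    ((pv_get_underlying_elements_from_relation er1).filter
      (fun s2 => decide ((s1, s2) ∈ er1 ∧ (s1, s2) ∈ er2))).map (fun s2 => (s1, s2)))

-- The nested S×S loop is a flatMap of filtered blocks over S.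
theorem pv_erA_eq_flatMap (er1 er2 : List (Int × Int)) (S : List Int) :
    S.foldl (fun acc s1 =>
      S.foldl (fun acc s2 =>
        if (s1, s2) ∈ er1 ∧ (s1, s2) ∈ er2 then acc ++ [(s1, s2)] else acc) acc) [] =
    S.flatMap (fun s1 =>
      (S.filter (fun s2 => decide ((s1, s2) ∈ er1 ∧ (s1, s2) ∈ er2))).map (fun s2 => (s1, s2))) := by
  have hinner : ∀ (s1 : Int) (acc : List (Int × Int)),
      S.foldl (fun acc s2 =>
        if (s1, s2) ∈ er1 ∧ (s1, s2) ∈ er2 then acc ++ [(s1, s2)] else acc) acc =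
      acc ++ (S.filter (fun s2 => decide ((s1, s2) ∈ er1 ∧ (s1, s2) ∈ er2))).map (fun s2 => (s1, s2)) := by
    intro s1 acc
    simpa using PySem.List.foldl_append_if
      (fun s2 => decide ((s1, s2) ∈ er1 ∧ (s1, s2) ∈ er2)) (fun s2 => (s1, s2)) S acc
  have h : ∀ (T : List Int) (acc : List (Int × Int)),
      T.foldl (fun acc s1 =>
        S.foldl (fun acc s2 =>
          if (s1, s2) ∈ er1 ∧ (s1, s2) ∈ er2 then acc ++ [(s1, s2)] else acc) acc) acc =
      acc ++ T.flatMap (fun s1 =>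
        (S.filter (fun s2 => decide ((s1, s2) ∈ er1 ∧ (s1, s2) ∈ er2))).map (fun s2 => (s1, s2))) := by
    intro T
    induction T with
    | nil => intro acc; simp
    | cons t ts ih =>
      intro acc
      rw [List.foldl_cons, List.flatMap_cons, hinner, ih, List.append_assoc]
  simpa using h S []

-- the flatMap shape instantiated at S = underlying elements, folded back into pv_dA
theorem pv_erA_eq_dA (er1 er2 : List (Int × Int)) :
    (pv_get_underlying_elements_from_relation er1).foldl (fun acc s1 =>
      (pv_get_underlying_elements_from_relation er1).foldl (fun acc s2 =>
        if (s1, s2) ∈ er1 ∧ (s1, s2) ∈ er2 then acc ++ [(s1, s2)] else acc) acc) [] =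
    pv_dA er1 er2 :=
  pv_erA_eq_flatMap er1 er2 _

theorem pv_dA_pairwise (er1 er2 : List (Int × Int)) :
    (pv_dA er1 er2).Pairwise (fun a b => (toLex a : Lex (Int × Int)) < toLex b) := by
  unfold pv_dA
  have hS := pv_S_pairwise er1
  -- generalize both occurrences of S, keeping the strict order of the inner list too
  generalize pv_get_underlying_elements_from_relation er1 = S at hS ⊢
  have key : ∀ (T : List Int), T.Pairwise (· < ·) →
      (T.flatMap (fun s1 =>
        (S.filter (fun s2 => decide ((s1, s2) ∈ er1 ∧ (s1, s2) ∈ er2))).map (fun s2 => (s1, s2)))).Pairwise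
        (fun a b => (toLex a : Lex (Int × Int)) < toLex b) := by
    intro T hT
    induction T with
    | nil => simp
    | cons t ts ih =>
      rw [List.flatMap_cons, List.pairwise_append]
      refine ⟨?_, ih (List.Pairwise.of_cons hT), ?_⟩
      · -- within the block headed by t: first components equal, second strictly increasing
        rw [List.pairwise_map]
        have := (hS.filter (fun s2 => decide ((t, s2) ∈ er1 ∧ (t, s2) ∈ er2)))
        exact this.imp (fun {a b} hab => by simp [Prod.Lex.lt_iff, hab])
      · -- across blocks: first component strictly increases
        intro a ha b hb
        rw [List.mem_map] at ha
        obtain ⟨s2, _, rfl⟩ := ha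
        rw [List.mem_flatMap] at hb
        obtain ⟨s1, hs1, hb'⟩ := hb
        rw [List.mem_map] at hb'
        obtain ⟨s2', _, rfl⟩ := hb'
        have ht : t < s1 := (List.pairwise_cons.mp hT).1 s1 hs1
        simp [Prod.Lex.lt_iff, ht]
  exact key S hS

theorem pv_mem_dA (er1 er2 : List (Int × Int)) (p : Int × Int) :
    p ∈ pv_dA er1 er2 ↔ p ∈ er1 ∧ p ∈ er2 := by
  unfold pv_dA
  constructor
  · intro h
    simp only [List.mem_flatMap, List.mem_map, List.mem_filter] at h
    obtain ⟨s1, _, s2, ⟨_, hcond⟩, hp⟩ := h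
    subst hp
    exact of_decide_eq_true hcond
  · rcases p with ⟨x, y⟩
    intro ⟨h1, h2⟩
    rw [List.mem_flatMap]
    refine ⟨x, (pv_mem_S er1 x).mpr ⟨(x, y), h1, Or.inl rfl⟩, ?_⟩
    rw [List.mem_map]
    refine ⟨y, ?_, rfl⟩
    rw [List.mem_filter]
    exact ⟨(pv_mem_S er1 y).mpr ⟨(x, y), h1, Or.inr rfl⟩, decide_eq_true ⟨h1, h2⟩⟩

theorem pv_dA_nodup (er1 er2 : List (Int × Int)) : (pv_dA er1 er2).Nodup :=
  (pv_dA_pairwise er1 er2).imp (fun h => ne_of_lt h) |>.imp (fun h he => h (by rw [he]))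

-- A's result is pv_dA itself.
theorem pv_A_eq_dA (er1 er2 : List (Int × Int)) :
    calculate_er_intersection er1 er2 = pv_dA er1 er2 := by
  simp only [calculate_er_intersection]
  rw [pv_erA_eq_dA]
  simp only [pv_rri_pair]
  rw [pv_foldl_dedup_eq_ofList_pair,
      PySem.Set.ofList_eq_self_of_nodup _ (pv_dA_nodup er1 er2),
      pv_sorted2_eq_of_perm _ _ (List.Perm.refl _) (pv_dA_pairwise er1 er2),
      pv_sorted2_eq_of_perm _ _ (List.Perm.refl _) (pv_dA_pairwise er1 er2)]

-- B's result is pv_dA too.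
theorem pv_B_eq_dA (er1 er2 : List (Int × Int)) :
    calculate_er_intersection_alt er1 er2 = pv_dA er1 er2 := by
  simp only [calculate_er_intersection_alt, pv_rri_pair_alt]
  rw [pv_foldl_dedup_eq_ofList_pair]
  have hperm : (pv_dA er1 er2).Perm (PySem.Set.ofList (er1.filter (fun p => decide (p ∈ er2)))) :=
    (List.perm_ext_iff_of_nodup (pv_dA_nodup er1 er2) (PySem.Set.nodup_ofList _)).mpr
      (fun a => by
        rw [pv_mem_dA, PySem.Set.mem_ofList, List.mem_filter]
        simp)
  rw [pv_sorted2_eq_of_perm _ _ hperm (pv_dA_pairwise er1 er2),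
      pv_sorted2_eq_of_perm _ _ (List.Perm.refl _) (pv_dA_pairwise er1 er2)]

-- ===== VERDICT (by name: the statement is the Claim_ definition above) =====
theorem calculate_er_intersection_spec : Claim_equal_calculate_er_intersection := by
  intro er1 er2 _
  unfold Spec_calculate_er_intersection
  rw [pv_A_eq_dA, pv_B_eq_dA]
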